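-- pv_equiv track=rewrite | github.com/jippylong12/tx-permit-search | by_date.py | matches_filter_criteria
-- ===== SOURCE A (Python) =====
-- TARGET_COUNTIES = ['Martin', 'Midland', 'Ector']  # Counties to filter for console display
--
-- EV_CHARGING_TERMS = [
--     'electric vehicle', 'ev', 'charging', 'charger', 'station',
--     'fast charging', 'dc fast', 'level 2', 'level 3',
--     'tesla', 'supercharger', 'chargepoint', 'electrify america',
--     'battery', 'lithium', 'power supply', 'electrical',
--     'renewable', 'solar', 'grid', 'infrastructure',
--     'plug-in', 'charging port', 'charging network',
--     'electric car', 'electric truck', 'hybrid',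
--     'charging hub', 'charging plaza'
-- ]
--
-- def matches_filter_criteria(item):
--     """Check if project matches county and EV charging term filters"""
--     # Check county filter
--     county_name = item.get('CountyName', '')
--     if county_name not in TARGET_COUNTIES:
--         return False
--
--     # Check EV charging terms in scope of work
--     scope_of_work = item.get('ScopeOfWork', '').lower()
--     project_name = item.get('ProjectName', '').lower()
--     facility_name = item.get('FacilityName', '').lower()
--
--     # Combine all text fields for searching
--     search_text = f"{scope_of_work} {project_name} {facility_name}"
--
--     # Check if any EV charging term is present
--     for term in EV_CHARGING_TERMS:
--         if term.lower() in search_text: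
--             return True
--
--     return False
-- ===== SOURCE B (Python) =====
-- TARGET_COUNTIES = ['Martin', 'Midland', 'Ector']  # Counties to filter for console display
--
-- EV_CHARGING_TERMS = [
--     'electric vehicle', 'ev', 'charging', 'charger', 'station',
--     'fast charging', 'dc fast', 'level 2', 'level 3',
--     'tesla', 'supercharger', 'chargepoint', 'electrify america',
--     'battery', 'lithium', 'power supply', 'electrical',
--     'renewable', 'solar', 'grid', 'infrastructure',
--     'plug-in', 'charging port', 'charging network',
--     'electric car', 'electric truck', 'hybrid',
--     'charging hub', 'charging plaza'
-- ]
--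
-- # Lowercased once at module load instead of on every call.
-- _EV_TERMS_LOWER = [t.lower() for t in EV_CHARGING_TERMS]
--
--
-- def matches_filter_criteria(item):
--     """Check if project matches county and EV charging term filters"""
--     if item.get('CountyName', '') not in TARGET_COUNTIES:
--         return False
--
--     search_text = (f"{item.get('ScopeOfWork', '').lower()} "
--                    f"{item.get('ProjectName', '').lower()} "
--                    f"{item.get('FacilityName', '').lower()}")
--
--     # Single left-to-right pass over the text: at each position, check whether
--     # any term starts there (multi-pattern scan), instead of one full substring
--     # scan of the text per term.
--     return any(
--         any(search_text.startswith(t, i) for t in _EV_TERMS_LOWER)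
--         for i in range(len(search_text))
--     )
-- ===== Notes on version B (the rewrite author's own statement) =====
-- stated objective: alternative
-- what changed: Replaces the per-term full substring scans with a single left-to-right pass over the combined text that checks at each position whether any (pre-lowercased) term starts there.
import Mathlib
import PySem

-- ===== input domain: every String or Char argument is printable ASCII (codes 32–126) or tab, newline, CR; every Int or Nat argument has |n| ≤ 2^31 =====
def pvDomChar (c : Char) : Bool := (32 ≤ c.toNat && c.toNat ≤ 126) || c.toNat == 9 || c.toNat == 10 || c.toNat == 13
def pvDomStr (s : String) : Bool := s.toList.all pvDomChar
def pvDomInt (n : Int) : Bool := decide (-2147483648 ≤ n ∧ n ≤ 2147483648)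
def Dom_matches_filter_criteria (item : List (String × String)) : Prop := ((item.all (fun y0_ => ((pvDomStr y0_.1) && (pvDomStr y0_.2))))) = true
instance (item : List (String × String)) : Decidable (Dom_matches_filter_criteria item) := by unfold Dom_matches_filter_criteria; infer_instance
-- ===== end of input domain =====

-- B replaces the per-term substring scans by one left-to-right pass over the text
-- checking at each position whether any pre-lowercased term starts there (alternative, same cost).

-- ===== PORT A =====
def pvTargetCounties : List String := ["Martin", "Midland", "Ector"]

def pvEvChargingTerms : List String :=
  ["electric vehicle", "ev", "charging", "charger", "station",
   "fast charging", "dc fast", "level 2", "level 3",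
   "tesla", "supercharger", "chargepoint", "electrify america",
   "battery", "lithium", "power supply", "electrical",
   "renewable", "solar", "grid", "infrastructure",
   "plug-in", "charging port", "charging network",
   "electric car", "electric truck", "hybrid",
   "charging hub", "charging plaza"]

def matches_filter_criteria (item : List (String × String)) : Bool :=
  let d := PySem.Dict.mk item
  let countyName := d.getD "CountyName" ""
  if ¬ (pvTargetCounties.contains countyName) then false
  else
    let scopeOfWork := PySem.Str.lower (d.getD "ScopeOfWork" "")
    let projectName := PySem.Str.lower (d.getD "ProjectName" "")
    let facilityName := PySem.Str.lower (d.getD "FacilityName" "")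
    let searchText := scopeOfWork ++ " " ++ projectName ++ " " ++ facilityName
    -- for term in EV_CHARGING_TERMS: if term.lower() in search_text: return True
    pvEvChargingTerms.any (fun term => PySem.Str.isIn (PySem.Str.lower term) searchText)

-- ===== PORT B =====
-- _EV_TERMS_LOWER = [t.lower() for t in EV_CHARGING_TERMS]
def pvEvTermsLower : List String := pvEvChargingTerms.map PySem.Str.lower

def matches_filter_criteria_alt (item : List (String × String)) : Bool :=
  let d := PySem.Dict.mk item
  if ¬ (pvTargetCounties.contains (d.getD "CountyName" "")) then false
  else
    let searchText := PySem.Str.lower (d.getD "ScopeOfWork" "") ++ " " ++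
                      PySem.Str.lower (d.getD "ProjectName" "") ++ " " ++
                      PySem.Str.lower (d.getD "FacilityName" "")
    -- any(any(search_text.startswith(t, i) for t in _EV_TERMS_LOWER) for i in range(len(search_text)))
    -- search_text.startswith(t, i) with 0 ≤ i ≤ len ported exactly as: t is a prefix of the text dropped at i
    (List.range searchText.toList.length).any (fun i =>
      pvEvTermsLower.any (fun t => PySem.Chars.startswith (searchText.toList.drop i) t.toList))

-- ===== PRECONDITION & SPEC =====
def Spec_matches_filter_criteria (item : List (String × String)) (out : Bool) : Prop := out = matches_filter_criteria_alt item
instance (item : List (String × String)) (out : Bool) : Decidable (Spec_matches_filter_criteria item out) := by unfold Spec_matches_filter_criteria; infer_instance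

-- ===== CLAIM (what is proved, stated in full; the proofs are below) =====
def Claim_equal_matches_filter_criteria : Prop := ∀ (item : List (String × String)), Dom_matches_filter_criteria item → Spec_matches_filter_criteria item (matches_filter_criteria item)

-- ===== LEMMAS AND PROOFS =====

-- every lowered term is nonempty
lemma pvEvTermsLower_ne_nil : ∀ t ∈ pvEvTermsLower, t.toList ≠ [] := by decide

-- a nonempty list is an infix iff it is a prefix at some position strictly inside
lemma infix_iff_exists_lt_prefix_drop {α : Type} (sub s : List α) (hne : sub ≠ []) :
    sub <:+: s ↔ ∃ i < s.length, sub <+: s.drop i := by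
  constructor
  · intro h
    obtain ⟨pre, suf, hps⟩ := h
    refine ⟨pre.length, ?_, ?_⟩
    · subst hps
      have hsub : 0 < sub.length := List.length_pos_iff.mpr hne
      simp [List.length_append]
      omega
    · subst hps
      rw [List.append_assoc, List.drop_left]
      exact ⟨suf, rfl⟩
  · rintro ⟨i, _, h⟩
    exact h.isInfix.trans (List.drop_suffix i s).isInfix

-- the per-term substring scans equal the single positional pass
lemma scan_eq (s : String) :
    pvEvChargingTerms.any (fun term => PySem.Str.isIn (PySem.Str.lower term) s)
    = (List.range s.toList.length).any (fun i =>
        pvEvTermsLower.any (fun t => PySem.Chars.startswith (s.toList.drop i) t.toList)) := by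
  rw [Bool.eq_iff_iff]
  simp only [List.any_eq_true, PySem.Str.isIn_iff_infix, pvEvTermsLower, List.mem_map,
    PySem.Chars.startswith_iff, List.mem_range]
  constructor
  · rintro ⟨term, hterm, hinf⟩
    have hne : (PySem.Str.lower term).toList ≠ [] :=
      pvEvTermsLower_ne_nil _ (by simp [pvEvTermsLower]; exact ⟨term, hterm, rfl⟩)
    obtain ⟨i, hi, hpre⟩ := (infix_iff_exists_lt_prefix_drop _ _ hne).mp hinf
    exact ⟨i, hi, _, ⟨term, hterm, rfl⟩, hpre⟩
  · rintro ⟨i, hi, t, ⟨term, hterm, rfl⟩, hpre⟩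
    exact ⟨term, hterm, hpre.isInfix.trans (List.drop_suffix i s.toList).isInfix⟩

-- ===== VERDICT (by name: the statement is the Claim_ definition above) =====
theorem matches_filter_criteria_spec : Claim_equal_matches_filter_criteria := by
  intro item _
  unfold Spec_matches_filter_criteria matches_filter_criteria matches_filter_criteria_alt
  show (if ¬ _ then false else _) = (if ¬ _ then false else _)
  by_cases h : pvTargetCounties.contains ((PySem.Dict.mk item).getD "CountyName" "") = true
  · rw [if_neg (not_not_intro h), if_neg (not_not_intro h)]
    exact scan_eq _
  · rw [if_pos h, if_pos h]
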